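-- pv_equiv track=rewrite | github.com/ddingmin/BOJ | 백준/Silver/24039. 2021은 무엇이 특별할까？/2021은 무엇이 특별할까？.py | solve
-- ===== SOURCE A (Python) =====
-- def solve(n):
--     prime = [1] * (20000)
--     prime[0], prime[1] = 0, 0
--     p = []
--     for i in range(2, 20000):
--         if prime[i] == 1:
--             p.append(i)
--             for j in range(2, 20000):
--                 if i * j >= 20000: break
--                 if prime[i * j] == 1:
--                     prime[i * j] = 0
--
--     for i in range(1, len(p)):
--         if p[i] * p[i - 1] > n:
--             return p[i] * p[i - 1]
--
--     return 0
-- ===== SOURCE B (Python) =====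
-- def solve(n):
--     def is_prime(k):
--         d = 2
--         while d * d <= k:
--             if k % d == 0:
--                 return False
--             d += 1
--         return True
--
--     prev = 0
--     for k in range(2, 20000):
--         if is_prime(k):
--             if prev and prev * k > n:
--                 return prev * k
--             prev = k
--     return 0
-- ===== Notes on version B (the rewrite author's own statement) =====
-- stated objective: simpler
-- what changed: Replaces the full-bound Eratosthenes sieve array plus a second index-based scan over a stored prime list with a single fused pass that tests each k by trial division and keeps only the previous prime, returning prev*k as soon as it exceeds n.
import Mathlib
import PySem

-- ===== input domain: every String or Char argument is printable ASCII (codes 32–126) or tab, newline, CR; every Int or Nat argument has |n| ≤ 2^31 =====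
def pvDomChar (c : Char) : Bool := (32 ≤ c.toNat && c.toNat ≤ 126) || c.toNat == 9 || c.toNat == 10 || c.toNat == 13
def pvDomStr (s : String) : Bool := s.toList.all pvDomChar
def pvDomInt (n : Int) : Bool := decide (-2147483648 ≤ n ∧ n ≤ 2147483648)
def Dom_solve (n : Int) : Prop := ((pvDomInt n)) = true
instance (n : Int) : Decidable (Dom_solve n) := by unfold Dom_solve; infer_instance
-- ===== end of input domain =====

-- B replaces the sieve + stored prime list + second index scan by one fused trial-division
-- pass keeping only the previous prime (objective: simpler).

-- ===== PORT A =====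
-- inner loop: for j in range(2, 20000): if i*j >= 20000: break; if prime[i*j]==1: prime[i*j]=0
def solveInner (i : Int) : List Int → List Int → List Int
  | [], prime => prime
  | j :: js, prime =>
    if i * j ≥ 20000 then prime
    else solveInner i js
      (if PySem.List.pyGetD prime (i * j) 0 = 1 then PySem.List.pySetD prime (i * j) 0 else prime)

-- outer loop over i in range(2, 20000), state (prime, p)
def solveOuter : List Int → List Int × List Int → List Int × List Int
  | [], st => st
  | i :: is, (prime, p) =>
    if PySem.List.pyGetD prime i 0 = 1 then
      solveOuter is (solveInner i (PySem.List.pyRange 2 20000 1) prime, p ++ [i])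
    else solveOuter is (prime, p)

-- final scan: for i in range(1, len(p)): if p[i]*p[i-1] > n: return p[i]*p[i-1]
def solveScan (p : List Int) (n : Int) : List Int → Int
  | [] => 0
  | i :: is =>
    if PySem.List.pyGetD p i 0 * PySem.List.pyGetD p (i - 1) 0 > n then
      PySem.List.pyGetD p i 0 * PySem.List.pyGetD p (i - 1) 0
    else solveScan p n is

def solve (n : Int) : Int :=
  let prime0 : List Int :=
    PySem.List.pySetD (PySem.List.pySetD (List.replicate 20000 (1 : Int)) 0 0) 1 0
  let st := solveOuter (PySem.List.pyRange 2 20000 1) (prime0, [])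
  solveScan st.2 n (PySem.List.pyRange 1 (st.2.length : Int) 1)

-- ===== PORT B =====
-- is_prime: trial division, d from 2 while d*d <= k
def solveAltIsPrime (k : Int) (d : Int) : Bool :=
  if d * d ≤ k then
    (if PySem.Int.mod k d = 0 then false else solveAltIsPrime k (d + 1))
  else true
termination_by (k + 1 - d).toNat
decreasing_by
  have hd : d ≤ k := by nlinarith [mul_self_nonneg d]
  omega

-- main loop: prev holds the last prime seen (0 = not set)
def solveAltLoop (n : Int) : Int → List Int → Int
  | _, [] => 0
  | prev, k :: ks =>
    if solveAltIsPrime k 2 then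
      (if prev ≠ 0 ∧ prev * k > n then prev * k else solveAltLoop n k ks)
    else
      solveAltLoop n prev ks

def solve_alt (n : Int) : Int := solveAltLoop n 0 (PySem.List.pyRange 2 20000 1)

-- ===== PRECONDITION & SPEC =====
def Spec_solve (n : Int) (out : Int) : Prop := out = solve_alt n
instance (n : Int) (out : Int) : Decidable (Spec_solve n out) := by unfold Spec_solve; infer_instance

-- ===== CLAIM (what is proved, stated in full; the proofs are below) =====
def Claim_equal_solve : Prop := ∀ (n : Int), Dom_solve n → Spec_solve n (solve n)

-- ===== LEMMAS AND PROOFS =====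

-- k is unmarked at outer index i: k ≥ 2 and no prime q < i divides k properly
def SvGood (i : Int) (k : Nat) : Prop :=
  2 ≤ k ∧ ∀ q : Nat, Nat.Prime q → (q : Int) < i → ¬((q : Nat) ∣ k ∧ q ≠ k)

-- sieve-array invariant at the start of outer iteration i
def SvInv (i : Int) (prime : List Int) : Prop :=
  prime.length = 20000 ∧
  ∀ k : Nat, k < 20000 →
    (prime.getD k 0 = 1 ↔ SvGood i k) ∧ (prime.getD k 0 = 0 ∨ prime.getD k 0 = 1)

-- the, abstract pair scan both programs reduce to
def svPairLoop (n : Int) : Int → List Int → Int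
  | _, [] => 0
  | prev, k :: ks => if prev ≠ 0 ∧ prev * k > n then prev * k else svPairLoop n k ks

-- B's primality test meets Nat.Prime
theorem solveAltIsPrime_spec (k d : Int) (hd : 0 ≤ d) :
    solveAltIsPrime k d = true ↔ ∀ e : Int, d ≤ e → e * e ≤ k → ¬(e ∣ k) := by
  rw [solveAltIsPrime]
  by_cases h : d * d ≤ k
  · simp only [if_pos h]
    by_cases hm : PySem.Int.mod k d = 0
    · simp only [if_pos hm]
      constructor
      · intro hf; cases hf
      · intro hall
        exact absurd ((PySem.Int.mod_eq_zero_iff_dvd k d).mp hm) (hall d le_rfl h)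
    · simp only [if_neg hm]
      rw [solveAltIsPrime_spec k (d + 1) (by omega)]
      constructor
      · intro hall e hde hek
        rcases eq_or_lt_of_le hde with he | he
        · exact fun hdvd => hm ((PySem.Int.mod_eq_zero_iff_dvd k d).mpr (he ▸ hdvd))
        · exact hall e (by omega) hek
      · intro hall e hde hek
        exact hall e (by omega) hek
  · simp only [if_neg h]
    constructor
    · intro _ e hde hek _
      have : d * d ≤ e * e := by nlinarith
      omega
    · intro _; trivial
termination_by (k + 1 - d).toNat
decreasing_by
  have hdk : d ≤ k := by nlinarith [mul_self_nonneg d]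
  omega

theorem solveAltIsPrime_iff (k : Int) (hk : 2 ≤ k) :
    solveAltIsPrime k 2 = true ↔ Nat.Prime k.toNat := by
  rw [solveAltIsPrime_spec k 2 (by omega), Nat.prime_def_le_sqrt]
  have hk0 : ((k.toNat : Int)) = k := Int.toNat_of_nonneg (by omega)
  constructor
  · intro hall
    refine ⟨by omega, fun m hm hms hdvd => ?_⟩
    have hmm : (m : Int) * (m : Int) ≤ k := by
      rw [← hk0]; exact_mod_cast Nat.le_sqrt.mp hms
    refine hall (m : Int) (by exact_mod_cast hm) hmm ?_
    rw [← hk0]; exact_mod_cast hdvd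
  · intro ⟨_, hall⟩ e he hek hdvd
    have he0 : ((e.toNat : Int)) = e := Int.toNat_of_nonneg (by omega)
    refine hall e.toNat (by omega) (Nat.le_sqrt.mpr ?_) ?_
    · have : (e.toNat * e.toNat : Int) ≤ (k.toNat : Int) := by
        rw [hk0]; push_cast [he0]; nlinarith
      exact_mod_cast this
    · rw [← Int.natCast_dvd_natCast, hk0, he0]; exact hdvd

-- B's loop = pair scan over the primes of the range
theorem solveAltLoop_eq (n prev : Int) (ks : List Int) :
    solveAltLoop n prev ks = svPairLoop n prev (ks.filter (fun k => solveAltIsPrime k 2)) := by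
  induction ks generalizing prev with
  | nil => simp [solveAltLoop, svPairLoop]
  | cons k ks ih =>
    by_cases h : solveAltIsPrime k 2 = true
    · simp [solveAltLoop, h, svPairLoop, ih]
    · simp [solveAltLoop, h, ih]

-- effect of A's inner loop
theorem solveInner_spec (i : Int) (hi : 2 ≤ i) :
    ∀ (N : Nat) (j : Int) (prime : List Int), 2 ≤ j → (20000 - j).toNat = N →
    prime.length = 20000 →
    (∀ k : Nat, k < 20000 → prime.getD k 0 = 0 ∨ prime.getD k 0 = 1) →
    (solveInner i (PySem.List.pyRange j 20000 1) prime).length = 20000 ∧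
    ∀ k : Nat, k < 20000 →
      ((∃ m : Int, j ≤ m ∧ (k : Int) = i * m) →
        (solveInner i (PySem.List.pyRange j 20000 1) prime).getD k 0 = 0) ∧
      ((¬∃ m : Int, j ≤ m ∧ (k : Int) = i * m) →
        (solveInner i (PySem.List.pyRange j 20000 1) prime).getD k 0 = prime.getD k 0) := by
  intro N
  induction N with
  | zero =>
    intro j prime hj hN hlen hv
    rw [PySem.List.pyRange_one_eq_nil (by omega)]
    refine ⟨hlen, fun k hk => ⟨fun ⟨m, hm, hkm⟩ => ?_, fun _ => rfl⟩⟩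
    have h1 : 20000 ≤ j := by omega
    nlinarith
  | succ N ih =>
    intro j prime hj hN hlen hv
    have hjlt : j < 20000 := by omega
    rw [PySem.List.pyRange_one_cons hjlt]
    simp only [solveInner]
    by_cases hbr : i * j ≥ 20000
    · rw [if_pos hbr]
      refine ⟨hlen, fun k hk => ⟨fun ⟨m, hm, hkm⟩ => ?_, fun _ => rfl⟩⟩
      have h1 : i * j ≤ i * m := mul_le_mul_of_nonneg_left hm (by omega)
      omega
    · rw [if_neg hbr]
      push Not at hbr
      have hij0 : 0 ≤ i * j := by positivity
      set t : Nat := (i * j).toNat with ht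
      have htc : ((t : Nat) : Int) = i * j := Int.toNat_of_nonneg hij0
      have htlt : t < 20000 := by omega
      set prime' : List Int :=
        (if PySem.List.pyGetD prime (i * j) 0 = 1 then PySem.List.pySetD prime (i * j) 0
         else prime) with hp'
      have hlen' : prime'.length = 20000 := by
        rw [hp']; split
        · rw [PySem.List.pySetD_of_nonneg prime 0 hij0, List.length_set]; exact hlen
        · exact hlen
      have hgetD' : ∀ k : Nat, k < 20000 →
          prime'.getD k 0 = if k = t then 0 else prime.getD k 0 := by
        intro k hk
        have hpg : PySem.List.pyGetD prime (i * j) 0 = prime.getD t 0 := by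
          rw [← htc, PySem.List.pyGetD_natCast]
        rw [hp']
        split
        · next hone =>
          rw [PySem.List.pySetD_of_nonneg prime 0 hij0]
          rw [List.getD_eq_getElem?_getD, List.getD_eq_getElem?_getD, List.getElem?_set]
          by_cases hkt : k = t
          · simp [hkt, ← ht, hlen, htlt]
          · simp [← ht, Ne.symm hkt, hkt]
        · next hone =>
          by_cases hkt : k = t
          · rw [if_pos hkt]
            rcases hv k hk with h0 | h1
            · exact h0
            · exact absurd (hpg.trans (hkt ▸ h1)) hone
          · rw [if_neg hkt]
      have hv' : ∀ k : Nat, k < 20000 → prime'.getD k 0 = 0 ∨ prime'.getD k 0 = 1 := by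
        intro k hk
        rw [hgetD' k hk]
        split
        · exact Or.inl rfl
        · exact hv k hk
      obtain ⟨ihlen, ihmain⟩ := ih (j + 1) prime' (by omega) (by omega) hlen' hv'
      refine ⟨ihlen, fun k hk => ⟨?_, ?_⟩⟩
      · rintro ⟨m, hm, hkm⟩
        by_cases h2 : ∃ m' : Int, j + 1 ≤ m' ∧ (k : Int) = i * m'
        · exact (ihmain k hk).1 h2
        · have hmj : m = j := by
            rcases lt_or_ge m (j + 1) with hlt | hge
            · omega
            · exact absurd ⟨m, hge, hkm⟩ h2
          have hkt : k = t := by subst hmj; omega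
          rw [(ihmain k hk).2 h2, hgetD' k hk, if_pos hkt]
      · intro hno
        have hno' : ¬∃ m' : Int, j + 1 ≤ m' ∧ (k : Int) = i * m' := by
          rintro ⟨m', hm', hkm'⟩
          exact hno ⟨m', by omega, hkm'⟩
        have hkt : k ≠ t := by
          intro hkt
          exact hno ⟨j, le_rfl, by omega⟩
        rw [(ihmain k hk).2 hno', hgetD' k hk, if_neg hkt]

-- A's outer loop produces exactly the primes of the range
theorem svGood_self (i : Int) (hi : 2 ≤ i) : SvGood i i.toNat ↔ Nat.Prime i.toNat := by
  have h2 : 2 ≤ i.toNat := by omega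
  constructor
  · intro ⟨_, hall⟩
    by_contra hnp
    have hne1 : i.toNat ≠ 1 := by omega
    have hq := Nat.minFac_prime hne1
    have hqd := Nat.minFac_dvd i.toNat
    have hqne : i.toNat.minFac ≠ i.toNat := fun he => hnp (Nat.prime_def_minFac.mpr ⟨h2, he⟩)
    have hqlt : i.toNat.minFac < i.toNat :=
      lt_of_le_of_ne (Nat.le_of_dvd (by omega) hqd) hqne
    exact hall i.toNat.minFac hq (by omega) ⟨hqd, hqne⟩
  · intro hp
    refine ⟨h2, fun q hq hqi ⟨hqd, hqne⟩ => ?_⟩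
    rcases Nat.Prime.eq_one_or_self_of_dvd hp q hqd with h1 | hs
    · exact Nat.Prime.ne_one hq h1
    · exact hqne hs

theorem svInv_succ_not_prime (i : Int) (hi : 2 ≤ i) (hnp : ¬ Nat.Prime i.toNat)
    (prime : List Int) (hInv : SvInv i prime) : SvInv (i + 1) prime := by
  refine ⟨hInv.1, fun k hk => ⟨?_, (hInv.2 k hk).2⟩⟩
  rw [(hInv.2 k hk).1]
  constructor
  · intro ⟨hk2, hall⟩
    refine ⟨hk2, fun q hq hqi hconj => ?_⟩
    rcases lt_or_ge (q : Int) i with h | h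
    · exact hall q hq h hconj
    · have hqq : i.toNat = q := by omega
      exact hnp (hqq ▸ hq)
  · intro ⟨hk2, hall⟩
    exact ⟨hk2, fun q hq hqi hconj => hall q hq (by omega) hconj⟩

theorem svInv_succ_prime (i : Int) (hi : 2 ≤ i) (hip : Nat.Prime i.toNat)
    (prime : List Int) (hInv : SvInv i prime) :
    SvInv (i + 1) (solveInner i (PySem.List.pyRange 2 20000 1) prime) := by
  obtain ⟨hlen, hcells⟩ := hInv
  obtain ⟨hlen', hmain⟩ := solveInner_spec i hi 19998 2 prime (by norm_num) (by decide)
    hlen (fun k hk => (hcells k hk).2)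
  refine ⟨hlen', fun k hk => ?_⟩
  obtain ⟨hz, hu⟩ := hmain k hk
  by_cases hex : ∃ m : Int, 2 ≤ m ∧ (k : Int) = i * m
  · have h0 := hz hex
    rw [h0]
    refine ⟨⟨fun h => absurd h (by norm_num), fun hg => ?_⟩, Or.inl rfl⟩
    exfalso
    obtain ⟨m, hm2, hkm⟩ := hex
    obtain ⟨hk2, hall⟩ := hg
    apply hall i.toNat hip (by omega)
    have hkeq : k = i.toNat * m.toNat := by
      have h1 : ((k : Nat) : Int) = ((i.toNat * m.toNat : Nat) : Int) := by
        push_cast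
        rw [Int.toNat_of_nonneg (by omega), Int.toNat_of_nonneg (by omega)]
        exact hkm
      exact_mod_cast h1
    constructor
    · exact ⟨m.toNat, hkeq⟩
    · have hi2 : 2 ≤ i.toNat := by omega
      have hm2' : 2 ≤ m.toNat := by omega
      nlinarith
  · have hU := hu hex
    rw [hU, (hcells k hk).1]
    refine ⟨⟨?_, ?_⟩, Or.imp_right (hcells k hk).1.mp (hcells k hk).2⟩
    · intro ⟨hk2, hall⟩
      refine ⟨hk2, fun q hq hqi hconj => ?_⟩
      rcases lt_or_ge (q : Int) i with h | h
      · exact hall q hq h hconj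
      · have hqq : i.toNat = q := by omega
        obtain ⟨hqd, hqne⟩ := hconj
        obtain ⟨c, hc⟩ := hqd
        have hc0 : c ≠ 0 := by rintro rfl; omega
        have hc1 : c ≠ 1 := by rintro rfl; rw [Nat.mul_one] at hc; exact hqne hc.symm
        refine hex ⟨(c : Int), by omega, ?_⟩
        rw [hc, ← hqq]
        push_cast
        rw [Int.toNat_of_nonneg (by omega)]
    · intro ⟨hk2, hall⟩
      exact ⟨hk2, fun q hq hqi hconj => hall q hq (by omega) hconj⟩

theorem solveOuter_spec :
    ∀ (N : Nat) (i : Int) (prime p : List Int), 2 ≤ i → i + N = 20000 → SvInv i prime →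
    (solveOuter (PySem.List.pyRange i 20000 1) (prime, p)).2 =
      p ++ (PySem.List.pyRange i 20000 1).filter (fun m => decide (Nat.Prime m.toNat)) := by
  intro N
  induction N with
  | zero =>
    intro i prime p h2 hN hInv
    rw [PySem.List.pyRange_one_eq_nil (by omega)]
    simp [solveOuter]
  | succ N ih =>
    intro i prime p h2 hN hInv
    rw [PySem.List.pyRange_one_cons (by omega)]
    simp only [solveOuter]
    have hic : ((i.toNat : Nat) : Int) = i := Int.toNat_of_nonneg (by omega)
    have hcell : PySem.List.pyGetD prime i 0 = prime.getD i.toNat 0 := by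
      conv_lhs => rw [← hic]
      rw [PySem.List.pyGetD_natCast]
    have hiff := (hInv.2 i.toNat (by omega)).1
    by_cases hp1 : prime.getD i.toNat 0 = 1
    · have hprime : Nat.Prime i.toNat := (svGood_self i h2).mp (hiff.mp hp1)
      rw [if_pos (hcell.trans hp1)]
      rw [ih (i + 1) _ (p ++ [i]) (by omega) (by omega) (svInv_succ_prime i h2 hprime prime hInv)]
      rw [List.filter_cons_of_pos (by simpa using hprime)]
      simp
    · have hnp : ¬ Nat.Prime i.toNat := fun hpr =>
        hp1 (hiff.mpr ((svGood_self i h2).mpr hpr))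
      rw [if_neg (fun hc => hp1 (hcell.symm.trans hc))]
      rw [ih (i + 1) prime p (by omega) (by omega) (svInv_succ_not_prime i h2 hnp prime hInv)]
      rw [List.filter_cons_of_neg (by simpa using hnp)]

-- A's index scan = pair scan
theorem solveScan_aux (p : List Int) (n : Int) (hp : ∀ x ∈ p, x ≠ 0) :
    ∀ (N m : Nat), 1 ≤ m → m + N = p.length →
    solveScan p n (PySem.List.pyRange (m : Int) (p.length : Int) 1) =
      svPairLoop n (p.getD (m - 1) 0) (p.drop m) := by
  intro N
  induction N with
  | zero =>
    intro m h1 h2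
    rw [PySem.List.pyRange_one_eq_nil (by exact_mod_cast (by omega : p.length ≤ m)),
      List.drop_eq_nil_of_le (by omega)]
    simp [solveScan, svPairLoop]
  | succ N ih =>
    intro m h1 h2
    have hm : m < p.length := by omega
    have hm1 : m - 1 < p.length := by omega
    rw [PySem.List.pyRange_one_cons (by exact_mod_cast hm)]
    simp only [solveScan]
    have e2 : ((m : Int) - 1) = ((m - 1 : Nat) : Int) := by omega
    rw [e2]
    rw [PySem.List.pyGetD_natCast, PySem.List.pyGetD_natCast]
    have hg : p.getD m 0 = p[m] := List.getD_eq_getElem p 0 hm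
    have hg1 : p.getD (m - 1) 0 = p[m - 1]'hm1 := List.getD_eq_getElem p 0 hm1
    have hne : p.getD (m - 1) 0 ≠ 0 := by
      rw [hg1]; exact hp _ (List.getElem_mem hm1)
    rw [List.drop_eq_getElem_cons hm]
    simp only [svPairLoop]
    by_cases hgt : p.getD (m - 1) 0 * p[m] > n
    · rw [if_pos (by rw [hg]; exact mul_comm (p.getD (m-1) 0) p[m] ▸ hgt),
        if_pos ⟨hne, hgt⟩]
      rw [hg]; ring
    · rw [if_neg (by rw [hg]; intro hc; exact hgt (by linarith [mul_comm (p.getD (m-1) 0) p[m]] )),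
        if_neg (by intro hc; exact hgt hc.2)]
      have : ((m : Int) + 1) = ((m + 1 : Nat) : Int) := by omega
      rw [this]
      have h3 := ih (m + 1) (by omega) (by omega)
      have h4 : m + 1 - 1 = m := by omega
      rw [h4, hg] at h3
      exact h3

theorem solveScan_eq (p : List Int) (n : Int) (hp : ∀ x ∈ p, x ≠ 0) :
    solveScan p n (PySem.List.pyRange 1 (p.length : Int) 1) = svPairLoop n 0 p := by
  match p, hp with
  | [], _ =>
    rw [PySem.List.pyRange_one_eq_nil (by simp)]
    simp [solveScan, svPairLoop]
  | a :: q, hp =>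
    have h := solveScan_aux (a :: q) n hp q.length 1 le_rfl (by simp [Nat.add_comm])
    rw [show ((1:Nat) : Int) = (1 : Int) from rfl] at h
    rw [h]
    simp [svPairLoop]

theorem svGood_two (k : Nat) : SvGood 2 k ↔ 2 ≤ k := by
  constructor
  · exact fun h => h.1
  · intro h
    exact ⟨h, fun q hq hql _ => by have := hq.two_le; omega⟩

theorem svInv_init :
    SvInv 2 (PySem.List.pySetD (PySem.List.pySetD (List.replicate 20000 (1 : Int)) 0 0) 1 0) := by
  have hset : PySem.List.pySetD (PySem.List.pySetD (List.replicate 20000 (1 : Int)) 0 0) 1 0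
      = ((List.replicate 20000 (1 : Int)).set 0 0).set 1 0 := by
    rw [PySem.List.pySetD_of_nonneg _ _ (by norm_num), PySem.List.pySetD_of_nonneg _ _ (by norm_num)]
    norm_num
  rw [hset]
  refine ⟨by simp only [List.length_set, List.length_replicate], fun k hk => ?_⟩
  have hg : (((List.replicate 20000 (1 : Int)).set 0 0).set 1 0).getD k 0
      = if k = 0 ∨ k = 1 then 0 else 1 := by
    rw [List.getD_eq_getElem?_getD]
    simp only [List.getElem?_set, List.getElem?_replicate, List.length_set, List.length_replicate]
    by_cases h0 : k = 0
    · subst h0; norm_num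
    · by_cases h1 : k = 1
      · subst h1; norm_num
      · rw [if_neg (by omega), if_neg (by omega), if_pos hk, if_neg (by omega)]
        rfl
  rw [hg, svGood_two]
  by_cases h01 : k = 0 ∨ k = 1
  · rw [if_pos h01]
    exact ⟨⟨fun h => absurd h (by norm_num), fun h => absurd h (by omega)⟩, Or.inl rfl⟩
  · rw [if_neg h01]
    exact ⟨⟨fun _ => by omega, fun _ => rfl⟩, Or.inr rfl⟩

-- ===== VERDICT (by name: the statement is the Claim_ definition above) =====
theorem solve_spec : Claim_equal_solve := by
  intro n _
  unfold Spec_solve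
  have hP : (solveOuter (PySem.List.pyRange 2 20000 1)
      (PySem.List.pySetD (PySem.List.pySetD (List.replicate 20000 (1 : Int)) 0 0) 1 0, [])).2
      = (PySem.List.pyRange 2 20000 1).filter (fun m => decide (Nat.Prime m.toNat)) := by
    rw [solveOuter_spec 19998 2 _ [] (by norm_num) (by norm_num) svInv_init]
    simp
  have hfilters : (PySem.List.pyRange 2 20000 1).filter (fun m => decide (Nat.Prime m.toNat))
      = (PySem.List.pyRange 2 20000 1).filter (fun k => solveAltIsPrime k 2) := by
    apply List.filter_congr
    intro x hx
    have hx2 : 2 ≤ x := (PySem.List.mem_pyRange_one.mp hx).1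
    apply Bool.coe_iff_coe.mp
    simp only [decide_eq_true_iff]
    exact (solveAltIsPrime_iff x hx2).symm
  have hp' : ∀ x ∈ (PySem.List.pyRange 2 20000 1).filter (fun k => solveAltIsPrime k 2), x ≠ 0 := by
    intro x hx
    have hm := List.mem_of_mem_filter hx
    have hx2 : 2 ≤ x := (PySem.List.mem_pyRange_one.mp hm).1
    omega
  simp only [solve]
  rw [hP, hfilters, solveScan_eq _ n hp']
  rw [solve_alt, solveAltLoop_eq]
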